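-- pv_equiv track=rewrite | github.com/darok/5entidos | pages/audio_recipe.py | _match_ingredient
-- ===== SOURCE A (Python) =====
-- def _match_ingredient(name: str, all_ingredients: list) -> tuple | None:
--     name_l = name.lower()
--     for ing in all_ingredients:
--         if ing["name"].lower() == name_l:
--             return (ing["name"], ing["id"])
--     for ing in all_ingredients:
--         if name_l in ing["name"].lower() or ing["name"].lower() in name_l:
--             return (ing["name"], ing["id"])
--     return None
-- ===== SOURCE B (Python) =====
-- def _match_ingredient(name: str, all_ingredients: list) -> tuple | None:
--     name_l = name.lower()
--     fallback = None
--     for ing in all_ingredients: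
--         ing_l = ing["name"].lower()
--         if ing_l == name_l:
--             return (ing["name"], ing["id"])
--         if fallback is None and (name_l in ing_l or ing_l in name_l):
--             fallback = ing
--     if fallback is None:
--         return None
--     return (fallback["name"], fallback["id"])
-- ===== Notes on version B (the rewrite author's own statement) =====
-- stated objective: simpler
-- what changed: Replaces A's two sequential scans with one pass that returns immediately on an exact lowercase match and remembers the first substring-matching ingredient dict as a fallback, building its result tuple only after the loop.
import Mathlib
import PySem

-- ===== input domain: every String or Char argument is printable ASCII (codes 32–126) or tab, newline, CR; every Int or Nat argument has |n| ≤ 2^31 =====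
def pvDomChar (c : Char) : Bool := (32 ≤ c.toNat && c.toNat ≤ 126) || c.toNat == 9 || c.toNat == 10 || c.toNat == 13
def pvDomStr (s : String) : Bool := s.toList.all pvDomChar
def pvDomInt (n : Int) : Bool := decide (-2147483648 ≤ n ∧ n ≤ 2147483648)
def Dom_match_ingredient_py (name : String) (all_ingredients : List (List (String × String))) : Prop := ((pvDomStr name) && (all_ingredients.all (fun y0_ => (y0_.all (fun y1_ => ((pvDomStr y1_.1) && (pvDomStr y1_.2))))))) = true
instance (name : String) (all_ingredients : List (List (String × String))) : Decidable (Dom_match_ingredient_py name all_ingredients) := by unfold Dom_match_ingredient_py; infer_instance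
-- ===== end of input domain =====

-- B folds A's two sequential scans into one pass that remembers the first substring-matching
-- dict as a fallback and builds its result tuple only after the loop (objective: simpler).
-- On inputs excluded by Pre_ (a missing "name"/"id" key, where Python raises KeyError) the
-- ports read the missing key as "" instead of raising.

-- ===== PORT A =====
-- ing["name"] / ing["id"]; outside Pre_ (missing key, where Python raises KeyError) this defaults to "".
def pvNameOf (d : List (String × String)) : String := PySem.Dict.getD (PySem.Dict.mk d) "name" ""
def pvIdOf (d : List (String × String)) : String := PySem.Dict.getD (PySem.Dict.mk d) "id" ""

-- first for-loop of A: exact lowercase match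
def pvLoopExact (name_l : String) : List (List (String × String)) → Option (String × String)
  | [] => none
  | d :: rest =>
    if PySem.Str.lower (pvNameOf d) == name_l then some (pvNameOf d, pvIdOf d)
    else pvLoopExact name_l rest

-- second for-loop of A: substring match either way
def pvLoopSub (name_l : String) : List (List (String × String)) → Option (String × String)
  | [] => none
  | d :: rest =>
    if PySem.Str.isIn name_l (PySem.Str.lower (pvNameOf d)) || PySem.Str.isIn (PySem.Str.lower (pvNameOf d)) name_l
    then some (pvNameOf d, pvIdOf d)
    else pvLoopSub name_l rest

def match_ingredient_py (name : String) (all_ingredients : List (List (String × String))) : Option (String × String) :=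
  let name_l := PySem.Str.lower name
  match pvLoopExact name_l all_ingredients with
  | some r => some r
  | none => pvLoopSub name_l all_ingredients

-- ===== PORT B =====
-- single pass; the fallback accumulator holds the first substring-matching DICT (Source B's loop);
-- the result tuple for the fallback is built only after the loop, as in Source B.
def pvLoopB (name_l : String) (fallback : Option (List (String × String))) :
    List (List (String × String)) → Option (String × String)
  | [] =>
    match fallback with
    | none => none
    | some d => some (pvNameOf d, pvIdOf d)
  | d :: rest =>
    let ing_l := PySem.Str.lower (pvNameOf d)
    if ing_l == name_l then some (pvNameOf d, pvIdOf d)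
    else
      let fallback' :=
        if fallback.isNone && (PySem.Str.isIn name_l ing_l || PySem.Str.isIn ing_l name_l)
        then some d else fallback
      pvLoopB name_l fallback' rest

def match_ingredient_py_alt (name : String) (all_ingredients : List (List (String × String))) : Option (String × String) :=
  pvLoopB (PySem.Str.lower name) none all_ingredients

-- ===== PRECONDITION & SPEC =====
-- Pre_ excludes exactly the inputs on which A raises KeyError: A's first scan stops at the first
-- dict that either lacks "name" (KeyError) or matches exactly — that stopper must have "name" and
-- "id"; if no such dict exists, the first substring-matching dict (if any) must have "id".
def Pre_match_ingredient_py (name : String) (all_ingredients : List (List (String × String))) : Prop :=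
  (let nl := PySem.Str.lower name
   match all_ingredients.find? (fun d =>
      !(PySem.Dict.contains (PySem.Dict.mk d) "name") || (PySem.Str.lower (pvNameOf d) == nl)) with
   | some d => PySem.Dict.contains (PySem.Dict.mk d) "name" && PySem.Dict.contains (PySem.Dict.mk d) "id"
   | none =>
     match all_ingredients.find? (fun d =>
        PySem.Str.isIn nl (PySem.Str.lower (pvNameOf d)) || PySem.Str.isIn (PySem.Str.lower (pvNameOf d)) nl) with
     | some d => PySem.Dict.contains (PySem.Dict.mk d) "id"
     | none => true) = true
instance (name : String) (all_ingredients : List (List (String × String))) : Decidable (Pre_match_ingredient_py name all_ingredients) := by unfold Pre_match_ingredient_py; infer_instance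

def pvWitness_match_ingredient_py : String × (List (List (String × String))) :=
  ("Salt", [[("name", "salt"), ("id", "1")], [("name", "pepper"), ("id", "2")]])

def Spec_match_ingredient_py (name : String) (all_ingredients : List (List (String × String))) (out : Option (String × String)) : Prop := out = match_ingredient_py_alt name all_ingredients
instance (name : String) (all_ingredients : List (List (String × String))) (out : Option (String × String)) : Decidable (Spec_match_ingredient_py name all_ingredients out) := by unfold Spec_match_ingredient_py; infer_instance

-- ===== CLAIM (what is proved, stated in full; the proofs are below) =====
def Claim_equal_match_ingredient_py : Prop := ∀ (name : String) (all_ingredients : List (List (String × String))), Dom_match_ingredient_py name all_ingredients → Pre_match_ingredient_py name all_ingredients → Spec_match_ingredient_py name all_ingredients (match_ingredient_py name all_ingredients)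

-- ===== LEMMAS AND PROOFS =====

-- B's single pass equals: exact scan first, else the fallback dict's tuple if set, else the substring scan.
theorem pvLoopB_eq (name_l : String) (fb : Option (List (String × String))) (xs : List (List (String × String))) :
    pvLoopB name_l fb xs =
      match pvLoopExact name_l xs with
      | some r => some r
      | none => match fb with
        | some d => some (pvNameOf d, pvIdOf d)
        | none => pvLoopSub name_l xs := by
  induction xs generalizing fb with
  | nil => cases fb <;> rfl
  | cons d rest ih =>
    by_cases hx : (PySem.Str.lower (pvNameOf d) == name_l) = true
    · simp only [pvLoopB, pvLoopExact, if_pos hx]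
    · simp only [pvLoopB, pvLoopExact, pvLoopSub, if_neg hx]
      rw [ih]
      cases fb with
      | some f =>
        simp only [Option.isNone_some, Bool.false_and, if_neg (Bool.false_ne_true)]
      | none =>
        simp only [Option.isNone_none, Bool.true_and]
        by_cases hs : (PySem.Str.isIn name_l (PySem.Str.lower (pvNameOf d)) || PySem.Str.isIn (PySem.Str.lower (pvNameOf d)) name_l) = true
        · simp only [if_pos hs]
        · simp only [if_neg hs]

-- ===== VERDICT (by name: the statement is the Claim_ definition above) =====
theorem match_ingredient_py_spec : Claim_equal_match_ingredient_py := by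
  intro name all_ingredients _ _
  unfold Spec_match_ingredient_py match_ingredient_py match_ingredient_py_alt
  rw [pvLoopB_eq]
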